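-- pv_equiv track=rewrite | github.com/elbanan/siwa | apps/siwa-api/app/api/routes/evaluations.py | _build_multilabel_confusion_matrix
-- ===== SOURCE A (Python) =====
-- from typing import Any, Callable, Dict, List, Optional, Set, Tuple
--
-- def _build_multilabel_confusion_matrix(
--     labels: List[str], truth_sets: List[Set[str]], pred_sets: List[Set[str]]
-- ) -> Dict[str, Dict[str, int]]:
--     """Count how often each truth label co-occurs with each predicted label."""
--
--     matrix: Dict[str, Dict[str, int]] = {
--         label: {pred_label: 0 for pred_label in labels} for label in labels
--     }
--     for truth_set, pred_set in zip(truth_sets, pred_sets):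
--         for truth_label in truth_set:
--             row = matrix.get(truth_label)
--             if row is None:
--                 continue
--             for pred_label in pred_set:
--                 if pred_label in row:
--                     row[pred_label] += 1
--     return matrix
-- ===== SOURCE B (Python) =====
-- def _build_multilabel_confusion_matrix(labels, truth_sets, pred_sets):
--     """Each cell computed independently as a closed-form count over the samples."""
--     samples = list(zip(truth_sets, pred_sets))
--     return {
--         row: {
--             col: sum(1 for t, p in samples if row in t and col in p)
--             for col in labels
--         }
--         for row in labels
--     }
-- ===== Notes on version B (the rewrite author's own statement) =====
-- stated objective: simpler
-- what changed: A allocates a dense nested dict and walks every (truth,pred) occurrence incrementing cells in place with membership guards; B computes each matrix cell independently as a closed-form count of samples containing both labels, in one comprehension with no mutation, no guards and no intermediate counter.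
import Mathlib
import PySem

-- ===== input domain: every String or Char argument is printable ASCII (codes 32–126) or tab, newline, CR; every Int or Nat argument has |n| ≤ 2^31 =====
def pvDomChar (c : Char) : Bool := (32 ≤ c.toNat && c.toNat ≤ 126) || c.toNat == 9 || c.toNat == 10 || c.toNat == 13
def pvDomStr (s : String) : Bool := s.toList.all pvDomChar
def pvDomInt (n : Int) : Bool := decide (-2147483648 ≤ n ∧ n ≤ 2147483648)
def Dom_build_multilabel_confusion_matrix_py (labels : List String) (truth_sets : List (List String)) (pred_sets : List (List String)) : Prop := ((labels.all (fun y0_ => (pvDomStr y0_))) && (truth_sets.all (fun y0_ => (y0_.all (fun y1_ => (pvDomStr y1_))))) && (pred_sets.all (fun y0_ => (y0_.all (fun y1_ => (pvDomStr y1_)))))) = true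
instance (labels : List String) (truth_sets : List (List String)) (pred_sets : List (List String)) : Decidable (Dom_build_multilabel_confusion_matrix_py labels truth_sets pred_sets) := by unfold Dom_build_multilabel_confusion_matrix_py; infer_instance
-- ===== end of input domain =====

-- B replaces A's in-place cell increments over every (truth,pred) occurrence by computing each
-- matrix cell independently as a count of the samples containing both labels (objective: simpler).

-- ===== PORT A =====
def build_multilabel_confusion_matrix_py (labels : List String) (truth_sets : List (List String)) (pred_sets : List (List String)) : List (String × List (String × Int)) :=
  -- matrix = {label: {pred_label: 0 for pred_label in labels} for label in labels}
  let matrix : PySem.Dict String (PySem.Dict String Int) :=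
    labels.foldl (fun m l =>
      m.insert l (labels.foldl (fun r p => r.insert p 0) PySem.Dict.empty)) PySem.Dict.empty
  -- for truth_set, pred_set in zip(truth_sets, pred_sets): …
  -- (Python mutates `row` in place; the port re-inserts the updated row under the same key,
  --  which PySem.Dict.insert overwrites in place, keeping its position — exact)
  let matrix := (truth_sets.zip pred_sets).foldl (fun m tp =>
    tp.1.foldl (fun m tl =>
      match m.get? tl with
      | none => m          -- if row is None: continue
      | some row =>
        m.insert tl (tp.2.foldl (fun r pl =>
          if r.contains pl then r.insert pl (r.getD pl 0 + 1) else r) row)) m) matrix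
  matrix.items.map (fun p => (p.1, p.2.items))

-- ===== PORT B =====
def build_multilabel_confusion_matrix_py_alt (labels : List String) (truth_sets : List (List String)) (pred_sets : List (List String)) : List (String × List (String × Int)) :=
  -- samples = list(zip(truth_sets, pred_sets))
  let samples := truth_sets.zip pred_sets
  -- {row: {col: sum(1 for t, p in samples if row in t and col in p) for col in labels} for row in labels}
  (labels.foldl (fun m row =>
      m.insert row ((labels.foldl (fun d col =>
          d.insert col (samples.foldl (fun acc tp =>
            if tp.1.contains row && tp.2.contains col then acc + 1 else acc) (0 : Int)))
        (PySem.Dict.empty : PySem.Dict String Int)).items))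
    (PySem.Dict.empty : PySem.Dict String (List (String × Int)))).items

-- ===== PRECONDITION & SPEC =====
-- Pre_ excludes inner lists with duplicate elements: truth_sets/pred_sets are typed Set[str] in
-- Python, so a list with duplicates represents no actual input of A, and A's occurrence-multiplied
-- counts on such lists are an artefact of feeding it a non-set.
def Pre_build_multilabel_confusion_matrix_py (labels : List String) (truth_sets : List (List String)) (pred_sets : List (List String)) : Prop :=
  (∀ t ∈ truth_sets, t.Nodup) ∧ (∀ p ∈ pred_sets, p.Nodup)
instance (labels : List String) (truth_sets : List (List String)) (pred_sets : List (List String)) : Decidable (Pre_build_multilabel_confusion_matrix_py labels truth_sets pred_sets) := by unfold Pre_build_multilabel_confusion_matrix_py; infer_instance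

def pvWitness_build_multilabel_confusion_matrix_py : List String × List (List String) × List (List String) :=
  (["a", "b"], [["a"], ["b", "a"]], [["b"], ["a"]])

def Spec_build_multilabel_confusion_matrix_py (labels : List String) (truth_sets : List (List String)) (pred_sets : List (List String)) (out : List (String × List (String × Int))) : Prop := out = build_multilabel_confusion_matrix_py_alt labels truth_sets pred_sets
instance (labels : List String) (truth_sets : List (List String)) (pred_sets : List (List String)) (out : List (String × List (String × Int))) : Decidable (Spec_build_multilabel_confusion_matrix_py labels truth_sets pred_sets out) := by unfold Spec_build_multilabel_confusion_matrix_py; infer_instance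

-- ===== CLAIM (what is proved, stated in full; the proofs are below) =====
def Claim_equal_build_multilabel_confusion_matrix_py : Prop := ∀ (labels : List String) (truth_sets : List (List String)) (pred_sets : List (List String)), Dom_build_multilabel_confusion_matrix_py labels truth_sets pred_sets → Pre_build_multilabel_confusion_matrix_py labels truth_sets pred_sets → Spec_build_multilabel_confusion_matrix_py labels truth_sets pred_sets (build_multilabel_confusion_matrix_py labels truth_sets pred_sets)

-- ===== LEMMAS AND PROOFS =====

-- the dense dict over the distinct labels S with values given by a function
def pvRow {V : Type} (S : List String) (g : String → V) : PySem.Dict String V :=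
  PySem.Dict.mk (S.map (fun c => (c, g c)))

-- the dense matrix over S with cell values h r c
def pvMat (S : List String) (h : String → String → Int) : PySem.Dict String (PySem.Dict String Int) :=
  pvRow S (fun r => pvRow S (h r))

-- the co-occurrence count both programs compute for cell (r, c)
def pvN (zs : List (List String × List String)) (r c : String) : Int :=
  (zs.map (fun tp => ((tp.1.count r : Int)) * ((tp.2.count c : Int)))).sum

theorem pvRow_keys {V : Type} (S : List String) (g : String → V) : (pvRow S g).keys = S := by
  simp [pvRow, PySem.Dict.keys_mk]
  exact List.map_id _

theorem pvRow_congr {V : Type} {S : List String} {g₁ g₂ : String → V}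
    (h : ∀ c ∈ S, g₁ c = g₂ c) : pvRow S g₁ = pvRow S g₂ := by
  unfold pvRow; congr 1; exact List.map_congr_left (fun c hc => by rw [h c hc])

theorem pvRow_getD {V : Type} {S : List String} (hS : S.Nodup) (g : String → V) {x : String}
    (hx : x ∈ S) (d0 : V) : (pvRow S g).getD x d0 = g x := by
  apply PySem.Dict.getD_of_mem_items
  · exact List.mem_map.mpr ⟨x, hx, rfl⟩
  · rw [pvRow_keys]; exact hS

theorem pvRow_contains {V : Type} (S : List String) (g : String → V) (x : String) :
    (pvRow S g).contains x = decide (x ∈ S) := by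
  rw [PySem.Dict.contains_eq_decide_mem_keys, pvRow_keys]

theorem pvRow_insert_mem {V : Type} {S : List String} (g : String → V) {x : String}
    (hx : x ∈ S) (v : V) :
    (pvRow S g).insert x v = pvRow S (fun y => if y = x then v else g y) := by
  apply PySem.Dict.ext
  rw [PySem.Dict.items_insert_of_contains _ _ (by rw [pvRow_contains]; simpa)]
  show ((S.map (fun c => (c, g c))).map _) = _
  rw [List.map_map]
  exact List.map_congr_left (fun y hy => by by_cases h : y = x <;> simp [h])

theorem pvRow_insert_not_mem {V : Type} {S : List String} (g : String → V) {x : String}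
    (hx : x ∉ S) (v : V) :
    (pvRow S g).insert x v = PySem.Dict.mk ((S.map (fun c => (c, g c))) ++ [(x, v)]) := by
  apply PySem.Dict.ext
  rw [PySem.Dict.items_insert_of_not_contains _ _ (by rw [pvRow_contains]; simpa)]
  rfl

theorem pvRow_get?_mem {V : Type} {S : List String} (hS : S.Nodup) (g : String → V) {x : String}
    (hx : x ∈ S) : (pvRow S g).get? x = some (g x) := by
  rw [PySem.Dict.get?_eq_some_iff_mem_items _ _ _ (by rw [pvRow_keys]; exact hS)]
  exact List.mem_map.mpr ⟨x, hx, rfl⟩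

theorem pvRow_get?_not_mem {V : Type} {S : List String} (g : String → V) {x : String}
    (hx : x ∉ S) : (pvRow S g).get? x = none := by
  rw [PySem.Dict.get?_eq_none_iff_not_mem_keys, pvRow_keys]; exact hx

theorem pvMat_congr {S : List String} {h₁ h₂ : String → String → Int}
    (h : ∀ r ∈ S, ∀ c ∈ S, h₁ r c = h₂ r c) : pvMat S h₁ = pvMat S h₂ :=
  pvRow_congr (fun r hr => pvRow_congr (fun c hc => h r hr c hc))

-- a 'd[x] = F(x)' loop over ls starting from the dense dict over S builds the dense dict over S ∪ ls
theorem pv_build {V : Type} (F : String → V) :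
    ∀ (ls S : List String), S.Nodup →
      ls.foldl (fun d x => d.insert x (F x)) (pvRow S F) = pvRow (PySem.Set.update S ls) F := by
  intro ls
  induction ls with
  | nil => intro S _; rfl
  | cons x ls ih =>
    intro S hS
    show ls.foldl _ ((pvRow S F).insert x (F x)) = pvRow (PySem.Set.update (PySem.Set.add S x) ls) F
    have hstep : (pvRow S F).insert x (F x) = pvRow (PySem.Set.add S x) F := by
      by_cases hx : x ∈ S
      · rw [pvRow_insert_mem F hx]
        have : PySem.Set.add S x = S := by
          simp [PySem.Set.add, hx]
        rw [this]
        exact pvRow_congr (fun c _ => by by_cases h : c = x <;> simp [h])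
      · rw [pvRow_insert_not_mem F hx]
        have : PySem.Set.add S x = S ++ [x] := by
          simp [PySem.Set.add, hx]
        rw [this]
        unfold pvRow
        rw [List.map_append]
        rfl
    rw [hstep]
    exact ih _ (PySem.Set.nodup_add S x hS)

theorem pv_build_empty {V : Type} (F : String → V) (ls : List String) :
    ls.foldl (fun d x => d.insert x (F x)) PySem.Dict.empty = pvRow (PySem.Set.ofList ls) F :=
  pv_build F ls [] List.nodup_nil

-- A, inner loop over pred_set on one row
theorem pvA_pfold {S : List String} (hS : S.Nodup) :
    ∀ (p : List String) (g : String → Int),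
      p.foldl (fun r pl => if r.contains pl then r.insert pl (r.getD pl 0 + 1) else r) (pvRow S g)
        = pvRow S (fun c => g c + (p.count c : Int)) := by
  intro p
  induction p with
  | nil => intro g; exact (pvRow_congr (fun c _ => by simp)).symm
  | cons pl rest ih =>
    intro g
    show rest.foldl _ (if (pvRow S g).contains pl then _ else _) = _
    by_cases hpl : pl ∈ S
    · rw [pvRow_contains, if_pos (by simpa using hpl)]
      rw [pvRow_getD hS g hpl, pvRow_insert_mem g hpl, ih]
      refine pvRow_congr (fun c hc => ?_)
      by_cases h : c = pl
      · subst h; simp; ring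
      · simp [h, Ne.symm h]
    · rw [pvRow_contains, if_neg (by simpa using hpl)]
      rw [ih]
      refine pvRow_congr (fun c hc => ?_)
      have : pl ≠ c := fun h => hpl (h ▸ hc)
      rw [List.count_cons_of_ne this]

-- A, middle loop over truth_set on the matrix
theorem pvA_tfold {S : List String} (hS : S.Nodup) (p : List String) :
    ∀ (t : List String) (h : String → String → Int),
      t.foldl (fun m tl =>
          match m.get? tl with
          | none => m
          | some row =>
            m.insert tl (p.foldl (fun r pl =>
              if r.contains pl then r.insert pl (r.getD pl 0 + 1) else r) row)) (pvMat S h)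
        = pvMat S (fun r c => h r c + (t.count r : Int) * (p.count c : Int)) := by
  intro t
  induction t with
  | nil => intro h; exact (pvMat_congr (fun r _ c _ => by simp)).symm
  | cons tl rest ih =>
    intro h
    by_cases htl : tl ∈ S
    · have hg : (pvMat S h).get? tl = some (pvRow S (h tl)) := pvRow_get?_mem hS _ htl
      show rest.foldl _ (match (pvMat S h).get? tl with
        | none => pvMat S h
        | some row => (pvMat S h).insert tl (p.foldl _ row)) = _
      rw [hg]
      show rest.foldl _ ((pvMat S h).insert tl (p.foldl _ (pvRow S (h tl)))) = _
      rw [pvA_pfold hS p (h tl)]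
      rw [show (pvMat S h) = pvRow S (fun r => pvRow S (h r)) from rfl]
      rw [pvRow_insert_mem _ htl]
      have hstep : (pvRow S (fun y => if y = tl then pvRow S (fun c => h tl c + (p.count c : Int)) else pvRow S (h y)))
          = pvMat S (fun r => if r = tl then (fun c => h tl c + (p.count c : Int)) else h r) := by
        exact pvRow_congr (fun y _ => by by_cases hy : y = tl <;> simp [hy])
      rw [hstep, ih]
      refine pvMat_congr (fun r hr c hc => ?_)
      by_cases hrt : r = tl
      · subst hrt; simp; ring
      · rw [List.count_cons_of_ne (fun h => hrt h.symm), if_neg hrt]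
    · have hg : (pvMat S h).get? tl = none := pvRow_get?_not_mem _ htl
      show rest.foldl _ (match (pvMat S h).get? tl with
        | none => pvMat S h
        | some row => (pvMat S h).insert tl (p.foldl _ row)) = _
      rw [hg]
      show rest.foldl _ (pvMat S h) = _
      rw [ih]
      refine pvMat_congr (fun r hr c hc => ?_)
      have : tl ≠ r := fun h' => htl (h' ▸ hr)
      rw [List.count_cons_of_ne this]

-- A, outer loop over the zipped pairs
theorem pvA_zfold {S : List String} (hS : S.Nodup) :
    ∀ (zs : List (List String × List String)) (h : String → String → Int),
      zs.foldl (fun m tp =>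
          tp.1.foldl (fun m tl =>
            match m.get? tl with
            | none => m
            | some row =>
              m.insert tl (tp.2.foldl (fun r pl =>
                if r.contains pl then r.insert pl (r.getD pl 0 + 1) else r) row)) m) (pvMat S h)
        = pvMat S (fun r c => h r c + pvN zs r c) := by
  intro zs
  induction zs with
  | nil => intro h; exact (pvMat_congr (fun r _ c _ => by simp [pvN])).symm
  | cons tp rest ih =>
    intro h
    show rest.foldl _ (tp.1.foldl _ (pvMat S h)) = _
    rw [pvA_tfold hS tp.2 tp.1 h, ih]
    refine pvMat_congr (fun r hr c hc => ?_)
    simp [pvN]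
    ring

-- on duplicate-free lists an occurrence count is a membership indicator
theorem pv_count_nodup {l : List String} (hl : l.Nodup) (x : String) :
    (l.count x : Int) = if l.contains x then 1 else 0 := by
  by_cases hx : x ∈ l
  · rw [List.count_eq_one_of_mem hl hx, if_pos (by simpa)]; simp
  · rw [List.count_eq_zero_of_not_mem hx, if_neg (by simpa)]; rfl

-- B's per-cell sample scan equals the co-occurrence count pvN (inner lists duplicate-free)
theorem pvB_cell (r c : String) :
    ∀ (zs : List (List String × List String)),
      (∀ tp ∈ zs, tp.1.Nodup ∧ tp.2.Nodup) → ∀ (a : Int),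
      zs.foldl (fun acc tp => if tp.1.contains r && tp.2.contains c then acc + 1 else acc) a
        = a + pvN zs r c := by
  intro zs
  induction zs with
  | nil => intro _ a; simp [pvN]
  | cons tp rest ih =>
    intro hnd a
    have ht := (hnd tp (List.mem_cons_self)).1
    have hp := (hnd tp (List.mem_cons_self)).2
    rw [List.foldl_cons, ih (fun x hx => hnd x (List.mem_cons_of_mem _ hx))]
    have hcnt : ((tp.1.count r : Int)) * ((tp.2.count c : Int))
        = if tp.1.contains r && tp.2.contains c then 1 else 0 := by
      rw [pv_count_nodup ht, pv_count_nodup hp]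
      by_cases h1 : tp.1.contains r = true <;> by_cases h2 : tp.2.contains c = true <;>
        simp only [h1, h2, Bool.and_self, Bool.and_false, Bool.false_and, if_true,
          if_false, Bool.false_eq_true, mul_one, mul_zero]
    simp only [pvN, List.map_cons, List.sum_cons]
    rw [hcnt]
    by_cases h : (tp.1.contains r && tp.2.contains c) = true
    · rw [if_pos h, if_pos h]; ring
    · rw [if_neg h, if_neg h]; ring

-- the two ports agree on every admitted input
theorem pv_final_eq (labels : List String) (ts ps : List (List String))
    (hpre : Pre_build_multilabel_confusion_matrix_py labels ts ps) :
    build_multilabel_confusion_matrix_py labels ts ps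
      = build_multilabel_confusion_matrix_py_alt labels ts ps := by
  unfold build_multilabel_confusion_matrix_py build_multilabel_confusion_matrix_py_alt
  dsimp only
  have hD : (PySem.Set.ofList labels).Nodup := PySem.Set.nodup_ofList labels
  have hzero : labels.foldl (fun r p => r.insert p (0:Int)) PySem.Dict.empty
      = pvRow (PySem.Set.ofList labels) (fun _ => (0:Int)) := pv_build_empty _ labels
  rw [hzero]
  have hinit : labels.foldl (fun m l => m.insert l (pvRow (PySem.Set.ofList labels) (fun _ => (0:Int)))) PySem.Dict.empty
      = pvMat (PySem.Set.ofList labels) (fun _ _ => 0) := pv_build_empty _ labels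
  rw [hinit, pvA_zfold hD (ts.zip ps) (fun _ _ => 0)]
  have hndz : ∀ tp ∈ ts.zip ps, tp.1.Nodup ∧ tp.2.Nodup := by
    intro tp htp
    obtain ⟨h1, h2⟩ := List.of_mem_zip (by simpa using htp)
    exact ⟨hpre.1 tp.1 h1, hpre.2 tp.2 h2⟩
  have houter : labels.foldl (fun m row =>
      m.insert row ((labels.foldl (fun d col =>
          d.insert col ((ts.zip ps).foldl (fun acc tp =>
            if tp.1.contains row && tp.2.contains col then acc + 1 else acc) (0 : Int)))
        (PySem.Dict.empty : PySem.Dict String Int)).items))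
      (PySem.Dict.empty : PySem.Dict String (List (String × Int)))
      = pvRow (PySem.Set.ofList labels) (fun row =>
          ((labels.foldl (fun d col =>
            d.insert col ((ts.zip ps).foldl (fun acc tp =>
              if tp.1.contains row && tp.2.contains col then acc + 1 else acc) (0 : Int)))
            (PySem.Dict.empty : PySem.Dict String Int)).items)) := pv_build_empty _ labels
  rw [houter]
  show ((PySem.Set.ofList labels).map (fun r => (r, pvRow (PySem.Set.ofList labels) (fun c => 0 + pvN (ts.zip ps) r c)))).map (fun p => (p.1, p.2.items))
      = (PySem.Set.ofList labels).map (fun row => (row, _))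
  rw [List.map_map]
  refine List.map_congr_left (fun r hr => ?_)
  have hrow : labels.foldl (fun d col =>
      d.insert col ((ts.zip ps).foldl (fun acc tp =>
        if tp.1.contains r && tp.2.contains col then acc + 1 else acc) (0 : Int))) PySem.Dict.empty
      = pvRow (PySem.Set.ofList labels) (fun col => (ts.zip ps).foldl (fun acc tp =>
        if tp.1.contains r && tp.2.contains col then acc + 1 else acc) (0 : Int)) := pv_build_empty _ labels
  simp only [Function.comp]
  rw [hrow]
  show (r, (PySem.Set.ofList labels).map (fun c => (c, 0 + pvN (ts.zip ps) r c)))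
      = (r, (PySem.Set.ofList labels).map (fun col => (col, _)))
  refine congrArg _ (List.map_congr_left (fun c hc => ?_))
  rw [pvB_cell r c (ts.zip ps) hndz 0]

-- ===== VERDICT (by name: the statement is the Claim_ definition above) =====
theorem build_multilabel_confusion_matrix_py_spec : Claim_equal_build_multilabel_confusion_matrix_py :=
  fun labels ts ps _ hpre => pv_final_eq labels ts ps hpre
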